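-- pv_equiv track=rewrite | github.com/leeiopd/algorithm | 2022/python/211011_programmers_상호평가.py | checkMinMax
-- ===== SOURCE A (Python) =====
-- def checkMinMax(x, y, scores, L):
--     Min = scores[y][x]
--     Max = scores[y][x]
--
--     for i in range(L):
--         if y == i:
--             continue
--         Min = min(scores[i][x], Min)
--         Max = max(scores[i][x], Max)
--
--     if scores[y][x] != Min and scores[y][x] != Max:
--         return True
--
--     for i in range(L):
--         if y == i:
--             continue
--         if scores[i][x] == scores[y][x]:
--             return True
--     return False
-- ===== SOURCE B (Python) =====
-- def checkMinMax(x, y, scores, L):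
--     v = scores[y][x]
--     less = 0
--     greater = 0
--     equal = 1  # the self value
--     for i in range(L):
--         if i == y:
--             continue
--         w = scores[i][x]
--         if w < v:
--             less += 1
--         elif w > v:
--             greater += 1
--         else:
--             equal += 1
--     return not (equal == 1 and (less == 0 or greater == 0))
-- ===== Notes on version B (the rewrite author's own statement) =====
-- stated objective: simpler
-- what changed: Replaces A's min/max fold followed by a second tie-search loop with a single pass keeping three counters (less/greater/equal) and one closing boolean formula.
import Mathlib
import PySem

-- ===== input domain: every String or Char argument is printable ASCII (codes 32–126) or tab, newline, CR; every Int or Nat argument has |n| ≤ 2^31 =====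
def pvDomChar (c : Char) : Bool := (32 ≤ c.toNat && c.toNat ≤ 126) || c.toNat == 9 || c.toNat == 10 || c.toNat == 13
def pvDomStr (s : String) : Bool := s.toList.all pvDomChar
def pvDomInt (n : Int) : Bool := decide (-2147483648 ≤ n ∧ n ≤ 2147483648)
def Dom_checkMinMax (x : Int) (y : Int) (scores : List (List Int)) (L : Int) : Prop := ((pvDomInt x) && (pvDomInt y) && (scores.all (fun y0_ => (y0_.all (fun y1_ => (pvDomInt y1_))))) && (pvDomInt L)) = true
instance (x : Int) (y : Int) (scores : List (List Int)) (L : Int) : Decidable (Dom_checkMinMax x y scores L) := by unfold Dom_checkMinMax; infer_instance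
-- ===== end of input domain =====

-- B replaces A's min/max fold plus a second tie-search loop by one pass keeping three counters; same O(L) cost (objective: simpler).

-- scores[i][x] with Python indexing (none = IndexError); shared by both ports
def pvGet2 (scores : List (List Int)) (i : Int) (x : Int) : Option Int :=
  (PySem.List.pyGet? scores i).bind (fun row => PySem.List.pyGet? row x)

-- ===== PORT A =====
-- first loop of A: fold updating (Min, Max); none once an access raises
def checkA_loop1 (x : Int) (y : Int) (scores : List (List Int))
    (l : List Int) (st : Option (Int × Int)) : Option (Int × Int) :=
  l.foldl (fun st i =>
    if y == i then st
    else match st, pvGet2 scores i x with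
      | some (mn, mx), some w => some (min w mn, max w mx)
      | _, _ => none) st

-- second loop of A: early return True on a tie
def checkA_loop2 (x : Int) (y : Int) (v : Int) (scores : List (List Int)) : List Int → Option Bool
  | [] => some false
  | i :: rest =>
    if y == i then checkA_loop2 x y v scores rest
    else match pvGet2 scores i x with
      | none => none
      | some w => if w == v then some true else checkA_loop2 x y v scores rest

def checkMinMax (x : Int) (y : Int) (scores : List (List Int)) (L : Int) : Bool :=
  match pvGet2 scores y x with
  | none => false
  | some v =>
    match checkA_loop1 x y scores (PySem.List.pyRange 0 L 1) (some (v, v)) with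
    | none => false
    | some (mn, mx) =>
      if v != mn && v != mx then true
      else (checkA_loop2 x y v scores (PySem.List.pyRange 0 L 1)).getD false

-- ===== PORT B =====
-- B's single pass: three counters (less, greater, equal)
def checkB_loop (x : Int) (y : Int) (v : Int) (scores : List (List Int))
    (l : List Int) (st : Option (Int × Int × Int)) : Option (Int × Int × Int) :=
  l.foldl (fun st i =>
    if i == y then st
    else match st, pvGet2 scores i x with
      | some (le, gr, eq), some w =>
        if w < v then some (le + 1, gr, eq)
        else if w > v then some (le, gr + 1, eq)
        else some (le, gr, eq + 1)
      | _, _ => none) st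

def checkMinMax_alt (x : Int) (y : Int) (scores : List (List Int)) (L : Int) : Bool :=
  match pvGet2 scores y x with
  | none => false
  | some v =>
    match checkB_loop x y v scores (PySem.List.pyRange 0 L 1) (some (0, 0, 1)) with
    | none => false
    | some (le, gr, eq) => !(eq == 1 && (le == 0 || gr == 0))

-- ===== PRECONDITION & SPEC =====
-- Pre_ excludes exactly the inputs where Python A raises IndexError (scores[y][x] or some scores[i][x], i < L, i ≠ y, out of range)
def Pre_checkMinMax (x : Int) (y : Int) (scores : List (List Int)) (L : Int) : Prop :=
  (pvGet2 scores y x).isSome = true ∧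
  ∀ i ∈ PySem.List.pyRange 0 L 1, y ≠ i → (pvGet2 scores i x).isSome = true
instance (x : Int) (y : Int) (scores : List (List Int)) (L : Int) : Decidable (Pre_checkMinMax x y scores L) := by unfold Pre_checkMinMax; infer_instance

def pvWitness_checkMinMax : Int × Int × List (List Int) × Int := (0, 0, [[1], [2]], 2)

def Spec_checkMinMax (x : Int) (y : Int) (scores : List (List Int)) (L : Int) (out : Bool) : Prop := out = checkMinMax_alt x y scores L
instance (x : Int) (y : Int) (scores : List (List Int)) (L : Int) (out : Bool) : Decidable (Spec_checkMinMax x y scores L out) := by unfold Spec_checkMinMax; infer_instance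

-- ===== CLAIM (what is proved, stated in full; the proofs are below) =====
def Claim_equal_checkMinMax : Prop := ∀ (x : Int) (y : Int) (scores : List (List Int)) (L : Int), Dom_checkMinMax x y scores L → Pre_checkMinMax x y scores L → Spec_checkMinMax x y scores L (checkMinMax x y scores L)

-- ===== LEMMAS AND PROOFS =====

-- the list of fetched other-column values, in loop order; none if some access raises
def pvVals (x : Int) (y : Int) (scores : List (List Int)) : List Int → Option (List Int)
  | [] => some []
  | i :: rest =>
    if y == i then pvVals x y scores rest
    else match pvGet2 scores i x with
      | none => none
      | some w => (pvVals x y scores rest).map (w :: ·)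

theorem pvVals_isSome (x y : Int) (scores : List (List Int)) (l : List Int)
    (h : ∀ i ∈ l, y ≠ i → (pvGet2 scores i x).isSome = true) :
    ∃ ws, pvVals x y scores l = some ws := by
  induction l with
  | nil => exact ⟨[], rfl⟩
  | cons i rest ih =>
    obtain ⟨ws, hws⟩ := ih (fun j hj hne => h j (List.mem_cons_of_mem _ hj) hne)
    by_cases hy : y = i
    · subst hy
      exact ⟨ws, by simp [pvVals, hws]⟩
    · have := h i (List.mem_cons_self ..) hy
      obtain ⟨w, hw⟩ := Option.isSome_iff_exists.mp this
      exact ⟨w :: ws, by simp [pvVals, hy, hw, hws]⟩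

theorem loop1_eq (x y : Int) (scores : List (List Int)) (l ws : List Int)
    (h : pvVals x y scores l = some ws) (mn mx : Int) :
    checkA_loop1 x y scores l (some (mn, mx)) =
      some (ws.foldl (fun a w => min w a) mn, ws.foldl (fun a w => max w a) mx) := by
  induction l generalizing ws mn mx with
  | nil => simp [pvVals] at h; subst h; rfl
  | cons i rest ih =>
    by_cases hy : y = i
    · subst hy
      simp only [pvVals, BEq.rfl, if_true] at h
      simpa [checkA_loop1, List.foldl] using ih ws h mn mx
    · simp [pvVals, hy] at h
      cases hw : pvGet2 scores i x with
      | none => simp [hw] at h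
      | some w =>
        simp [hw] at h
        obtain ⟨ws', hws', rfl⟩ := h
        simpa [checkA_loop1, List.foldl, hy, hw] using ih ws' hws' (min w mn) (max w mx)

theorem loop2_eq (x y v : Int) (scores : List (List Int)) (l ws : List Int)
    (h : pvVals x y scores l = some ws) :
    checkA_loop2 x y v scores l = some (ws.any (· == v)) := by
  induction l generalizing ws with
  | nil => simp [pvVals] at h; subst h; rfl
  | cons i rest ih =>
    by_cases hy : y = i
    · subst hy
      simp only [pvVals, BEq.rfl, if_true] at h
      simpa [checkA_loop2] using ih ws h
    · simp [pvVals, hy] at h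
      cases hw : pvGet2 scores i x with
      | none => simp [hw] at h
      | some w =>
        simp [hw] at h
        obtain ⟨ws', hws', rfl⟩ := h
        by_cases hwv : w = v
        · simp [checkA_loop2, hy, hw, hwv]
        · have hb : (w == v) = false := by simp [hwv]
          simpa [checkA_loop2, hy, hw, hb] using ih ws' hws'

theorem loopB_eq (x y v : Int) (scores : List (List Int)) (l ws : List Int)
    (h : pvVals x y scores l = some ws) (le gr eq : Int) :
    checkB_loop x y v scores l (some (le, gr, eq)) =
      some (le + ws.countP (fun w => decide (w < v)),
            gr + ws.countP (fun w => decide (v < w)),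
            eq + ws.countP (fun w => decide (w = v))) := by
  induction l generalizing ws le gr eq with
  | nil => simp [pvVals] at h; subst h; simp [checkB_loop]
  | cons i rest ih =>
    by_cases hy : y = i
    · subst hy
      simp only [pvVals, BEq.rfl, if_true] at h
      simpa [checkB_loop, List.foldl] using ih ws h le gr eq
    · simp [pvVals, hy] at h
      cases hw : pvGet2 scores i x with
      | none => simp [hw] at h
      | some w =>
        simp [hw] at h
        obtain ⟨ws', hws', rfl⟩ := h
        have hne : (i == y) = false := by simp; exact fun hh => hy hh.symm
        rcases lt_trichotomy w v with hlt | heq | hgt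
        · have hstep : checkB_loop x y v scores (i :: rest) (some (le, gr, eq)) =
              checkB_loop x y v scores rest (some (le + 1, gr, eq)) := by
            simp [checkB_loop, List.foldl, hne, hw, hlt]
          have d1 : (decide (w < v)) = true := by simp [hlt]
          have d2 : (decide (v < w)) = false := by simp [not_lt.mpr hlt.le]
          have d3 : (decide (w = v)) = false := by simp [ne_of_lt hlt]
          rw [hstep, ih ws' hws']
          simp only [Option.some.injEq, Prod.mk.injEq, List.countP_cons, d1, d2, d3,
            Bool.false_eq_true, if_true, if_false]
          refine ⟨?_, ?_, ?_⟩ <;> omega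
        · have hstep : checkB_loop x y v scores (i :: rest) (some (le, gr, eq)) =
              checkB_loop x y v scores rest (some (le, gr, eq + 1)) := by
            simp [checkB_loop, List.foldl, hne, hw, heq]
          have d1 : (decide (w < v)) = false := by simp [heq]
          have d2 : (decide (v < w)) = false := by simp [heq]
          have d3 : (decide (w = v)) = true := by simp [heq]
          rw [hstep, ih ws' hws']
          simp only [Option.some.injEq, Prod.mk.injEq, List.countP_cons, d1, d2, d3,
            Bool.false_eq_true, if_true, if_false]
          refine ⟨?_, ?_, ?_⟩ <;> omega
        · have hstep : checkB_loop x y v scores (i :: rest) (some (le, gr, eq)) =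
              checkB_loop x y v scores rest (some (le, gr + 1, eq)) := by
            simp [checkB_loop, List.foldl, hne, hw, not_lt.mpr hgt.le, hgt]
          have d1 : (decide (w < v)) = false := by simp [not_lt.mpr hgt.le]
          have d2 : (decide (v < w)) = true := by simp [hgt]
          have d3 : (decide (w = v)) = false := by simp [(ne_of_lt hgt).symm]
          rw [hstep, ih ws' hws']
          simp only [Option.some.injEq, Prod.mk.injEq, List.countP_cons, d1, d2, d3,
            Bool.false_eq_true, if_true, if_false]
          refine ⟨?_, ?_, ?_⟩ <;> omega

theorem foldl_min_le (ws : List Int) (a : Int) :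
    ws.foldl (fun b w => min w b) a ≤ a := by
  induction ws generalizing a with
  | nil => exact le_refl a
  | cons w ws ih => exact le_trans (ih (min w a)) (min_le_right w a)

theorem foldl_min_eq_iff (ws : List Int) (a : Int) :
    ws.foldl (fun b w => min w b) a = a ↔ ws.countP (fun w => decide (w < a)) = 0 := by
  induction ws generalizing a with
  | nil => simp
  | cons w ws ih =>
    simp only [List.foldl, List.countP_cons]
    by_cases hw : w < a
    · simp only [hw, decide_true]
      constructor
      · intro h
        exact absurd h (ne_of_lt (lt_of_le_of_lt (le_trans (foldl_min_le _ _) (min_le_left w a)) hw))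
      · intro hh; exact absurd hh (Nat.succ_ne_zero _)
    · have : min w a = a := min_eq_right (not_lt.mp hw)
      simp [this, hw, ih a]

theorem foldl_max_ge (ws : List Int) (a : Int) :
    a ≤ ws.foldl (fun b w => max w b) a := by
  induction ws generalizing a with
  | nil => exact le_refl a
  | cons w ws ih => exact le_trans (le_max_right w a) (ih (max w a))

theorem foldl_max_eq_iff (ws : List Int) (a : Int) :
    ws.foldl (fun b w => max w b) a = a ↔ ws.countP (fun w => decide (a < w)) = 0 := by
  induction ws generalizing a with
  | nil => simp
  | cons w ws ih =>
    simp only [List.foldl, List.countP_cons]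
    by_cases hw : a < w
    · simp only [hw, decide_true]
      constructor
      · intro h
        exact absurd h.symm (ne_of_lt (lt_of_lt_of_le (lt_of_lt_of_le hw (le_max_left w a)) (foldl_max_ge _ _)))
      · intro hh; exact absurd hh (Nat.succ_ne_zero _)
    · have : max w a = a := max_eq_right (not_lt.mp hw)
      simp [this, hw, ih a]

theorem any_eq_countP (ws : List Int) (v : Int) :
    ws.any (· == v) = (ws.countP (fun w => decide (w = v)) != 0) := by
  induction ws with
  | nil => rfl
  | cons w ws ih =>
    by_cases hw : w = v <;> simp [hw, ih]

-- ===== VERDICT (by name: the statement is the Claim_ definition above) =====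
theorem checkMinMax_spec : Claim_equal_checkMinMax := by
  intro x y scores L _ hpre
  obtain ⟨hself, hall⟩ := hpre
  obtain ⟨v, hv⟩ := Option.isSome_iff_exists.mp hself
  obtain ⟨ws, hws⟩ := pvVals_isSome x y scores (PySem.List.pyRange 0 L 1) hall
  unfold Spec_checkMinMax checkMinMax checkMinMax_alt
  rw [hv]
  dsimp only
  rw [loop1_eq x y scores _ ws hws v v, loopB_eq x y v scores _ ws hws 0 0 1,
    loop2_eq x y v scores _ ws hws]
  dsimp only [Option.getD_some]
  rw [any_eq_countP]
  set clt := ws.countP (fun w => decide (w < v)) with hclt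
  set cgt := ws.countP (fun w => decide (v < w)) with hcgt
  set ceq := ws.countP (fun w => decide (w = v)) with hceq
  have hmin : (v != ws.foldl (fun a w => min w a) v) = !decide (clt = 0) := by
    by_cases hc : clt = 0
    · have := (foldl_min_eq_iff ws v).mpr hc
      simp [this, hc]
    · have hne : ¬ ws.foldl (fun b w => min w b) v = v :=
        fun hh => hc ((foldl_min_eq_iff ws v).mp hh)
      simp [hc, bne_iff_ne]
      exact fun hh => hne hh.symm
  have hmax : (v != ws.foldl (fun a w => max w a) v) = !decide (cgt = 0) := by
    by_cases hc : cgt = 0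
    · have := (foldl_max_eq_iff ws v).mpr hc
      simp [this, hc]
    · have hne : ¬ ws.foldl (fun b w => max w b) v = v :=
        fun hh => hc ((foldl_max_eq_iff ws v).mp hh)
      simp [hc, bne_iff_ne]
      exact fun hh => hne hh.symm
  rw [hmin, hmax]
  have h1 : ((0 + (clt : Int) == 0)) = decide (clt = 0) := by
    by_cases hc : clt = 0 <;> simp [hc]
  have h2 : ((0 + (cgt : Int) == 0)) = decide (cgt = 0) := by
    by_cases hc : cgt = 0 <;> simp [hc]
  have h3 : ((1 + (ceq : Int) == 1)) = decide (ceq = 0) := by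
    by_cases hc : ceq = 0 <;> simp [hc]
  have h4 : (ceq != 0) = !decide (ceq = 0) := by
    by_cases hc : ceq = 0 <;> simp [hc]
  rw [h1, h2, h3, h4]
  by_cases hc1 : clt = 0 <;> by_cases hc2 : cgt = 0 <;> by_cases hc3 : ceq = 0 <;>
    simp [hc1, hc2, hc3]
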